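-- pv_equiv track=rewrite | github.com/lucca30/ufrj-general | rec_info/filtro.py | map_termos
-- ===== SOURCE A (Python) =====
-- def map_termos(M):
--     temp = []
--     for doc in M:
--         for token in doc:
--             if(token not in temp):
--                 temp.append(token)
--     temp.sort()
--     return len(temp), temp
-- ===== SOURCE B (Python) =====
-- def map_termos(M):
--     tokens = []
--     for doc in M:
--         tokens.extend(doc)
--     tokens.sort()
--     result = []
--     prev = None
--     for t in tokens:
--         if prev != t:
--             result.append(t)
--             prev = t
--     return len(result), result
-- ===== Notes on version B (the rewrite author's own statement) =====
-- stated objective: faster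
-- what changed: Replaces the quadratic membership-scan dedup (token not in temp) by flatten-all, one sort, then a single linear pass that keeps each token only when it differs from the previously kept one.
import Mathlib
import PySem

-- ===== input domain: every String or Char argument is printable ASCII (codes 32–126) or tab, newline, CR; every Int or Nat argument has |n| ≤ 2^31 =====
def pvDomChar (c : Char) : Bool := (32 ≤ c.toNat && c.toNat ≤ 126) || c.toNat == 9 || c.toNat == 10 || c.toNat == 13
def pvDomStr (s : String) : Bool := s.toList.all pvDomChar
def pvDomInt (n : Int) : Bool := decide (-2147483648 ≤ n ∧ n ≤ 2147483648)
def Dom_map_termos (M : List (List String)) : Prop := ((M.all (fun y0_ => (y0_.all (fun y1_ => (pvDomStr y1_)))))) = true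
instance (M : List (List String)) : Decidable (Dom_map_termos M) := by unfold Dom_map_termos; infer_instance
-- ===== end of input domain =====

-- B flattens all tokens, sorts once, and dedups adjacent duplicates in one pass,
-- replacing A's quadratic membership-scan dedup (faster in a timing run's measurement).


-- ===== PORT A =====
-- temp = []; for doc in M: for token in doc: if token not in temp: temp.append(token); temp.sort()
def map_termos (M : List (List String)) : Int × List String :=
  let temp : List String :=
    M.foldl (fun temp doc =>
      doc.foldl (fun temp token =>
        if token ∈ temp then temp else temp ++ [token]) temp) []
  let temp := PySem.List.sorted temp (fun x => x) false
  ((temp.length : Int), temp)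

-- ===== PORT B =====
def map_termos_alt (M : List (List String)) : Int × List String :=
  let tokens : List String := M.foldl (fun tokens doc => tokens ++ doc) []
  let tokens := PySem.List.sorted tokens (fun x => x) false
  let st : List String × Option String :=
    tokens.foldl (fun (st : List String × Option String) t =>
      if st.2 ≠ some t then (st.1 ++ [t], some t) else st) ([], none)
  ((st.1.length : Int), st.1)

-- ===== PRECONDITION & SPEC =====
def Spec_map_termos (M : List (List String)) (out : Int × List String) : Prop := out = map_termos_alt M
instance (M : List (List String)) (out : Int × List String) : Decidable (Spec_map_termos M out) := by unfold Spec_map_termos; infer_instance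

-- ===== CLAIM (what is proved, stated in full; the proofs are below) =====
def Claim_equal_map_termos : Prop := ∀ (M : List (List String)), Dom_map_termos M → Spec_map_termos M (map_termos M)

-- ===== LEMMAS AND PROOFS =====

-- recursive description of B's dedup loop
def pvAdj : Option String → List String → List String
  | _, [] => []
  | prev, t :: ts => if prev ≠ some t then t :: pvAdj (some t) ts else pvAdj prev ts

theorem pvAdj_loop (xs : List String) : ∀ (res : List String) (prev : Option String),
    (xs.foldl (fun (st : List String × Option String) t =>
      if st.2 ≠ some t then (st.1 ++ [t], some t) else st) (res, prev)).1
      = res ++ pvAdj prev xs := by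
  induction xs with
  | nil => intro res prev; simp [pvAdj]
  | cons t ts ih =>
    intro res prev
    by_cases h : prev = some t
    · subst h
      simp only [List.foldl_cons, ne_eq, not_true_eq_false, if_false, ih, pvAdj]
    · simp only [List.foldl_cons, ne_eq, h, not_false_eq_true, if_true, ih, pvAdj]
      simp

-- key lemma about pvAdj on a sorted list
theorem pvAdj_sorted (s : List String) (hs : s.Pairwise (· ≤ ·)) (p : String)
    (hp : ∀ y ∈ s, p ≤ y) :
    (pvAdj (some p) s).Pairwise (· < ·) ∧ ∀ x, x ∈ pvAdj (some p) s ↔ (x ∈ s ∧ x ≠ p) := by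
  induction s generalizing p with
  | nil => simp [pvAdj]
  | cons t ts ih =>
    rcases List.pairwise_cons.mp hs with ⟨h1, h2⟩
    have hpt : p ≤ t := hp t (by simp)
    by_cases hpe : t = p
    · subst hpe
      have := ih h2 t (fun y hy => h1 y hy)
      have hstep : pvAdj (some t) (t :: ts) = pvAdj (some t) ts := by simp [pvAdj]
      rw [hstep]
      constructor
      · exact this.1
      · intro x
        rw [(this.2 x)]
        constructor
        · rintro ⟨hx, hxt⟩; exact ⟨List.mem_cons_of_mem _ hx, hxt⟩
        · rintro ⟨hx, hxt⟩
          rcases List.mem_cons.mp hx with h | h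
          · exact absurd h hxt
          · exact ⟨h, hxt⟩
    · have := ih h2 t h1
      have hstep : pvAdj (some p) (t :: ts) = t :: pvAdj (some t) ts := by
        simp [pvAdj, Ne.symm, hpe]
      rw [hstep]
      constructor
      · refine List.pairwise_cons.mpr ⟨?_, this.1⟩
        intro x hx
        rcases (this.2 x).mp hx with ⟨hx1, hx2⟩
        exact lt_of_le_of_ne (h1 x hx1) (Ne.symm hx2)
      · intro x
        rw [List.mem_cons, (this.2 x)]
        constructor
        · rintro (rfl | ⟨hx1, hx2⟩)
          · exact ⟨by simp, hpe⟩
          · refine ⟨List.mem_cons_of_mem _ hx1, ?_⟩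
            rintro rfl
            exact hpe (le_antisymm (h1 x hx1) hpt)
        · rintro ⟨hx1, hx2⟩
          rcases List.mem_cons.mp hx1 with rfl | h
          · exact Or.inl rfl
          · by_cases hxt : x = t
            · exact Or.inl hxt
            · exact Or.inr ⟨h, hxt⟩

theorem pvAdj_none (s : List String) (hs : s.Pairwise (· ≤ ·)) :
    (pvAdj none s).Pairwise (· < ·) ∧ ∀ x, x ∈ pvAdj none s ↔ x ∈ s := by
  cases s with
  | nil => simp [pvAdj]
  | cons t ts =>
    rcases List.pairwise_cons.mp hs with ⟨h1, h2⟩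
    have key := pvAdj_sorted ts h2 t h1
    have hstep : pvAdj none (t :: ts) = t :: pvAdj (some t) ts := by simp [pvAdj]
    rw [hstep]
    constructor
    · refine List.pairwise_cons.mpr ⟨?_, key.1⟩
      intro x hx
      rcases (key.2 x).mp hx with ⟨hx1, hx2⟩
      exact lt_of_le_of_ne (h1 x hx1) (Ne.symm hx2)
    · intro x
      rw [List.mem_cons, (key.2 x), List.mem_cons]
      constructor
      · rintro (rfl | ⟨hx1, _⟩)
        · exact Or.inl rfl
        · exact Or.inr hx1
      · rintro (rfl | h)
        · exact Or.inl rfl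
        · by_cases hxt : x = t
          · exact Or.inl hxt
          · exact Or.inr ⟨h, hxt⟩

-- A's dedup accumulator: nodup and membership
theorem pvInner (doc : List String) : ∀ (temp : List String), temp.Nodup →
    (doc.foldl (fun temp token => if token ∈ temp then temp else temp ++ [token]) temp).Nodup
    ∧ ∀ x, x ∈ doc.foldl (fun temp token => if token ∈ temp then temp else temp ++ [token]) temp
        ↔ (x ∈ temp ∨ x ∈ doc) := by
  induction doc with
  | nil => intro temp h; refine ⟨by simpa using h, fun x => by simp⟩
  | cons t ts ih =>
    intro temp h
    simp only [List.foldl_cons]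
    by_cases ht : t ∈ temp
    · rw [if_pos ht]
      rcases ih temp h with ⟨h1, h2⟩
      refine ⟨h1, fun x => ?_⟩
      rw [h2 x, List.mem_cons]
      constructor
      · rintro (hx | hx)
        · exact Or.inl hx
        · exact Or.inr (Or.inr hx)
      · rintro (hx | rfl | hx)
        · exact Or.inl hx
        · exact Or.inl ht
        · exact Or.inr hx
    · rw [if_neg ht]
      have hnd : (temp ++ [t]).Nodup := by
        simp [List.nodup_append, h]
        intro a ha hat
        exact ht (hat ▸ ha)
      rcases ih (temp ++ [t]) hnd with ⟨h1, h2⟩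
      refine ⟨h1, fun x => ?_⟩
      rw [h2 x, List.mem_append, List.mem_singleton, List.mem_cons]
      tauto

theorem pvOuter (M : List (List String)) : ∀ (temp : List String), temp.Nodup →
    (M.foldl (fun temp doc =>
        doc.foldl (fun temp token => if token ∈ temp then temp else temp ++ [token]) temp) temp).Nodup
    ∧ ∀ x, x ∈ M.foldl (fun temp doc =>
        doc.foldl (fun temp token => if token ∈ temp then temp else temp ++ [token]) temp) temp
        ↔ (x ∈ temp ∨ ∃ doc ∈ M, x ∈ doc) := by
  induction M with
  | nil => intro temp h; refine ⟨by simpa using h, fun x => by simp⟩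
  | cons d ds ih =>
    intro temp h
    simp only [List.foldl_cons]
    rcases pvInner d temp h with ⟨h1, h2⟩
    rcases ih _ h1 with ⟨h3, h4⟩
    refine ⟨h3, fun x => ?_⟩
    rw [h4 x, h2 x]
    simp only [List.mem_cons]
    constructor
    · rintro ((hx | hx) | ⟨doc, hd, hx⟩)
      · exact Or.inl hx
      · exact Or.inr ⟨d, Or.inl rfl, hx⟩
      · exact Or.inr ⟨doc, Or.inr hd, hx⟩
    · rintro (hx | ⟨doc, (rfl | hd), hx⟩)
      · exact Or.inl (Or.inl hx)
      · exact Or.inl (Or.inr hx)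
      · exact Or.inr ⟨doc, hd, hx⟩

-- membership of the flatten fold
theorem pvFlat (M : List (List String)) : ∀ (acc : List String) (x : String),
    x ∈ M.foldl (fun tokens doc => tokens ++ doc) acc ↔ (x ∈ acc ∨ ∃ doc ∈ M, x ∈ doc) := by
  induction M with
  | nil => simp
  | cons d ds ih =>
    intro acc x
    simp only [List.foldl_cons, ih, List.mem_append, List.mem_cons]
    constructor
    · rintro ((hx | hx) | ⟨doc, hd, hx⟩)
      · exact Or.inl hx
      · exact Or.inr ⟨d, Or.inl rfl, hx⟩
      · exact Or.inr ⟨doc, Or.inr hd, hx⟩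
    · rintro (hx | ⟨doc, (rfl | hd), hx⟩)
      · exact Or.inl (Or.inl hx)
      · exact Or.inl (Or.inr hx)
      · exact Or.inr ⟨doc, hd, hx⟩

-- ===== VERDICT (by name: the statement is the Claim_ definition above) =====
theorem map_termos_spec : Claim_equal_map_termos := by
  intro M _
  have hsp : (PySem.List.sorted (M.foldl (fun tokens doc => tokens ++ doc) [])
      (fun x => x) false).Pairwise (· ≤ ·) := by
    simpa using PySem.List.sorted_pairwise (M.foldl (fun tokens doc => tokens ++ doc) []) (fun x => x)
  rcases pvAdj_none _ hsp with ⟨hys_lt, hys_mem⟩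
  rcases pvOuter M [] (by simp) with ⟨htn, htm⟩
  have hmem : ∀ x, x ∈ pvAdj none (PySem.List.sorted (M.foldl (fun tokens doc => tokens ++ doc) [])
        (fun x => x) false)
      ↔ x ∈ M.foldl (fun temp doc =>
          doc.foldl (fun temp token => if token ∈ temp then temp else temp ++ [token]) temp) [] := by
    intro x
    rw [hys_mem x, PySem.List.mem_sorted, pvFlat M [] x, htm x]
  have hperm : (pvAdj none (PySem.List.sorted (M.foldl (fun tokens doc => tokens ++ doc) [])
        (fun x => x) false)).Perm
      (M.foldl (fun temp doc =>
        doc.foldl (fun temp token => if token ∈ temp then temp else temp ++ [token]) temp) []) := by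
    rw [List.perm_ext_iff_of_nodup (hys_lt.imp (fun h => ne_of_lt h)) htn]
    exact hmem
  have hkey : PySem.List.sorted (M.foldl (fun temp doc =>
        doc.foldl (fun temp token => if token ∈ temp then temp else temp ++ [token]) temp) [])
        (fun x => x) false
      = pvAdj none (PySem.List.sorted (M.foldl (fun tokens doc => tokens ++ doc) [])
        (fun x => x) false) := by
    apply PySem.List.sorted_eq_of_perm_of_pairwise_lt
    · exact hperm
    · simpa using hys_lt
  have hloop := pvAdj_loop (PySem.List.sorted (M.foldl (fun tokens doc => tokens ++ doc) [])
      (fun x => x) false) [] none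
  unfold Spec_map_termos map_termos map_termos_alt
  simp only [hkey, hloop, List.nil_append]
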